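-- pv_equiv track=rewrite | github.com/olegzaikin/dsat | find_decomp_set.py | parse_solver_log
-- ===== SOURCE A (Python) =====
-- def parse_solver_log(log):
-- 	res = 'INDET'
-- 	lines = log.split('\n')
-- 	for line in lines:
-- 		if len(line) < 12:
-- 			continue
-- 		if 's SATISFIABLE' in line:
-- 			res = 'SAT'
-- 		elif 's UNSATISFIABLE' in line:
-- 			res = 'UNSAT'
-- 	return res
-- ===== SOURCE B (Python) =====
-- def parse_solver_log(log):
-- 	for line in reversed(log.split('\n')):
-- 		if 's SATISFIABLE' in line:
-- 			return 'SAT'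
-- 		if 's UNSATISFIABLE' in line:
-- 			return 'UNSAT'
-- 	return 'INDET'
-- ===== Notes on version B (the rewrite author's own statement) =====
-- stated objective: alternative
-- what changed: Replaces the forward scan that overwrites an accumulator with the last marker seen (guarded by a redundant len<12 check) by a reverse scan over the lines that returns immediately at the first SAT/UNSAT marker found.
import Mathlib
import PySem

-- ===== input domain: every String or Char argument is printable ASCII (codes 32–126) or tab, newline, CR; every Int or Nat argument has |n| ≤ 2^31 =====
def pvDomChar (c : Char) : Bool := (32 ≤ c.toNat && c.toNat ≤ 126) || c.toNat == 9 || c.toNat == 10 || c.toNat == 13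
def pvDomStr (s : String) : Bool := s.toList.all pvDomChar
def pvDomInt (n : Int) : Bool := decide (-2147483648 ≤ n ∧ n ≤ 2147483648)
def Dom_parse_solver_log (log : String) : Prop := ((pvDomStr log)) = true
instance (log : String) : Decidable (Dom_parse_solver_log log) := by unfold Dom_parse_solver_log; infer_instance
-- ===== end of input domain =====

-- B replaces A's forward accumulate-last scan (with its redundant len<12 guard) by a
-- reverse early-exit scan over the lines; proved equal on all printable-ASCII inputs.


-- ===== PORT A =====
-- forward fold over the lines, keeping the last marker seen in the accumulator
def parse_solver_log (log : String) : String :=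
  ((PySem.Str.split? log "\n").getD []).foldl
    (fun res line =>
      if PySem.Str.len line < 12 then res
      else if PySem.Str.isIn "s SATISFIABLE" line then "SAT"
      else if PySem.Str.isIn "s UNSATISFIABLE" line then "UNSAT"
      else res)
    "INDET"

-- ===== PORT B =====
-- early-exit scan ('for … return …; return INDET' loop of Source B)
def pvRevScan : List String → String
  | [] => "INDET"
  | line :: rest =>
      if PySem.Str.isIn "s SATISFIABLE" line then "SAT"
      else if PySem.Str.isIn "s UNSATISFIABLE" line then "UNSAT"
      else pvRevScan rest

def parse_solver_log_alt (log : String) : String :=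
  pvRevScan ((PySem.Str.split? log "\n").getD []).reverse

-- ===== PRECONDITION & SPEC =====
def Spec_parse_solver_log (log : String) (out : String) : Prop := out = parse_solver_log_alt log
instance (log : String) (out : String) : Decidable (Spec_parse_solver_log log out) := by unfold Spec_parse_solver_log; infer_instance

-- ===== CLAIM (what is proved, stated in full; the proofs are below) =====
def Claim_equal_parse_solver_log : Prop := ∀ (log : String), Dom_parse_solver_log log → Spec_parse_solver_log log (parse_solver_log log)

-- ===== LEMMAS AND PROOFS =====

-- a line containing a 13-char marker is at least 13 (hence ≥ 12) chars long
theorem pv_isIn_len {sub line : String} (h : PySem.Str.isIn sub line = true) :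
    (sub.toList.length : Int) ≤ PySem.Str.len line := by
  rw [PySem.Str.isIn_eq] at h
  have hinf := (PySem.Chars.isIn_iff_infix _ _).mp h
  have := hinf.length_le
  rw [PySem.Str.len_eq]
  exact_mod_cast this

theorem pvRevScan_append (ys zs : List String) :
    pvRevScan (ys ++ zs) = if pvRevScan ys = "INDET" then pvRevScan zs else pvRevScan ys := by
  induction ys with
  | nil => simp [pvRevScan]
  | cons l rest ih =>
      simp only [List.cons_append, pvRevScan]
      split_ifs with h1 h2 <;> simp_all

-- the forward fold with accumulator equals the reverse early-exit scan (with the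
-- accumulator as the no-match value)
theorem pv_fold_eq_rev (lines : List String) (acc : String) :
    lines.foldl
      (fun res line =>
        if PySem.Str.len line < 12 then res
        else if PySem.Str.isIn "s SATISFIABLE" line then "SAT"
        else if PySem.Str.isIn "s UNSATISFIABLE" line then "UNSAT"
        else res) acc
    = if pvRevScan lines.reverse = "INDET" then acc else pvRevScan lines.reverse := by
  induction lines generalizing acc with
  | nil => simp [pvRevScan]
  | cons l rest ih =>
      rw [List.foldl_cons, ih, List.reverse_cons, pvRevScan_append]
      by_cases hP : pvRevScan rest.reverse = "INDET"
      · rw [if_pos hP, if_pos hP]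
        simp only [pvRevScan]
        by_cases hs : PySem.Str.isIn "s SATISFIABLE" l = true
        · have hlen : ¬ PySem.Str.len l < 12 := by
            have := pv_isIn_len hs; simp at this ⊢; omega
          rw [if_neg hlen, if_pos hs, if_pos hs, if_neg (by decide : ¬ ("SAT" : String) = "INDET")]
        · rw [if_neg hs, if_neg hs]
          by_cases hu : PySem.Str.isIn "s UNSATISFIABLE" l = true
          · have hlen : ¬ PySem.Str.len l < 12 := by
              have := pv_isIn_len hu; simp at this ⊢; omega
            rw [if_neg hlen, if_pos hu, if_pos hu,
                if_neg (by decide : ¬ ("UNSAT" : String) = "INDET")]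
          · rw [if_neg hu, if_neg hu, if_pos (rfl : ("INDET" : String) = "INDET")]
            split_ifs <;> rfl
      · rw [if_neg hP, if_neg hP, if_neg hP]

-- ===== VERDICT (by name: the statement is the Claim_ definition above) =====
theorem parse_solver_log_spec : Claim_equal_parse_solver_log := by
  intro log _
  unfold Spec_parse_solver_log parse_solver_log parse_solver_log_alt
  rw [pv_fold_eq_rev]
  split_ifs with h <;> simp [h]
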